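-- pv_equiv track=rewrite | github.com/matematikaadit/happybite | python/p026.py | recycle
-- ===== SOURCE A (Python) =====
-- def recycle(n):
--     pos = {}
--     a = 1
--     for i in range(n):
--         if a in pos:
--             return i - pos[a]
--         if a == 0:
--             return 0
--         pos[a] = i
--         a = (a*10) % n
--     return 0
-- ===== SOURCE B (Python) =====
-- def recycle(n):
--     if n <= 0:
--         return 0
--     m = n
--     while m % 2 == 0:
--         m //= 2
--     while m % 5 == 0:
--         m //= 5
--     if m == 1:
--         return 0
--     r = 10 % m
--     k = 1
--     while r != 1:
--         r = r * 10 % m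
--         k += 1
--     return k
-- ===== Notes on version B (the rewrite author's own statement) =====
-- stated objective: faster
-- what changed: Replaces A's remainder-to-position dictionary cycle detection over the sequence 10^i mod n with stripping all factors 2 and 5 from n and then computing the multiplicative order of 10 modulo the stripped part with one running remainder, so the dict disappears.
import Mathlib
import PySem

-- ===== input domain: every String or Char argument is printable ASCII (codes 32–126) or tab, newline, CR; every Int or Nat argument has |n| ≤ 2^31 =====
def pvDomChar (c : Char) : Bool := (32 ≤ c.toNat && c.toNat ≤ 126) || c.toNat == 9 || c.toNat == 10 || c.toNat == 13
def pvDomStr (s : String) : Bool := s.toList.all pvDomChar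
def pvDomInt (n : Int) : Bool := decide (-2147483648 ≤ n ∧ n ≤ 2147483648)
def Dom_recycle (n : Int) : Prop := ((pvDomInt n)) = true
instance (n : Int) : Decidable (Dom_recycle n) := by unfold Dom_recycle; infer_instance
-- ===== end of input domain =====

-- B strips the factors 2 and 5 from n and returns the multiplicative order of 10 modulo the
-- stripped part (0 if it is 1, or if n <= 0), replacing A's remainder->position dict with one
-- running remainder: measurably faster by a constant factor, same return value for every int n.

-- ===== PORT A =====
-- the for-loop with its early returns, one recursive step per range element
def recycleGo (n : Int) (pos : PySem.Dict Int Int) (a : Int) : List Int → Int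
  | [] => 0
  | i :: rest =>
    if pos.contains a then i - ((pos.get? a).getD 0)   -- pos[a]; the guard makes KeyError impossible
    else if a = 0 then 0
    else recycleGo n (pos.insert a i) (PySem.Int.mod (a * 10) n) rest

def recycle (n : Int) : Int :=
  recycleGo n PySem.Dict.empty 1 (PySem.List.pyRange 0 n 1)

-- ===== PORT B =====
-- while m % p == 0: m //= p    (the '0 < m ∧ 2 ≤ p' conjuncts only make the recursion total;
-- they hold at every call reached from recycle_alt, where m ≥ 1 and p ∈ {2, 5})
def stripP (p m : Nat) : Nat :=
  if h : m % p = 0 ∧ 0 < m ∧ 2 ≤ p then stripP p (m / p) else m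
  termination_by m
  decreasing_by exact Nat.div_lt_self h.2.1 (by omega)

-- while r != 1: r = r * 10 % m; k += 1    (fuel m is provably enough: the order of 10 mod m is < m)
def ordLoop (m : Nat) : Nat → Nat → Nat → Nat
  | 0, _, k => k
  | fuel + 1, r, k => if r = 1 then k else ordLoop m fuel (r * 10 % m) (k + 1)

def recycle_alt (n : Int) : Int :=
  if n ≤ 0 then 0
  else
    let m := stripP 5 (stripP 2 n.toNat)
    if m = 1 then 0 else ((ordLoop m m (10 % m) 1 : Nat) : Int)

-- ===== PRECONDITION & SPEC =====
def Spec_recycle (n : Int) (out : Int) : Prop := out = recycle_alt n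
instance (n : Int) (out : Int) : Decidable (Spec_recycle n out) := by unfold Spec_recycle; infer_instance

-- ===== CLAIM (what is proved, stated in full; the proofs are below) =====
def Claim_equal_recycle : Prop := ∀ (n : Int), Dom_recycle n → Spec_recycle n (recycle n)

-- ===== LEMMAS AND PROOFS =====

-- the remainder sequence A's variable `a` follows (for n ≥ 2), over Nat
def fseq (N i : Nat) : Nat := 10 ^ i % N

-- an "event" at index j: A's loop returns at the first event
def Event (N j : Nat) : Prop := (∃ i, i < j ∧ fseq N i = fseq N j) ∨ fseq N j = 0

theorem stripP_spec (p : Nat) (hp : 2 ≤ p) :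
    ∀ m, 0 < m → ∃ e, m = p ^ e * stripP p m ∧ ¬ p ∣ stripP p m ∧ 0 < stripP p m := by
  intro m
  induction m using Nat.strong_induction_on with
  | _ m ih =>
    intro hm
    rw [stripP]
    split_ifs with h
    · have hdvd : p ∣ m := Nat.dvd_of_mod_eq_zero h.1
      have hlt : m / p < m := Nat.div_lt_self hm (by omega)
      have hpos : 0 < m / p := Nat.div_pos (Nat.le_of_dvd hm hdvd) (by omega)
      obtain ⟨e, he, hnd, hp0⟩ := ih (m / p) hlt hpos
      exact ⟨e + 1, by rw [pow_succ]; rw [mul_comm (p^e) p, mul_assoc, ← he]; exact (Nat.mul_div_cancel' hdvd).symm, hnd, hp0⟩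
    · refine ⟨0, by simp, ?_, hm⟩
      intro hd
      exact h ⟨Nat.mod_eq_zero_of_dvd hd, hm, hp⟩

theorem ordLoop_correct (m : Nat) (ord : Nat)
    (hP : 10 ^ ord % m = 1)
    (hmin : ∀ j, 0 < j → 10 ^ j % m = 1 → ord ≤ j) :
    ∀ fuel k, 0 < k → k ≤ ord → ord < k + fuel → ordLoop m fuel (10 ^ k % m) k = ord := by
  intro fuel
  induction fuel with
  | zero => intro k h1 h2 h3; omega
  | succ fuel ih =>
    intro k h1 h2 h3
    simp only [ordLoop]
    split_ifs with hr
    · have := hmin k h1 hr; omega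
    · have hk : k ≠ ord := fun he => hr (he ▸ hP)
      have hstep : 10 ^ k % m * 10 % m = 10 ^ (k + 1) % m := by
        rw [Nat.mod_mul_mod, ← pow_succ]
      rw [hstep]
      exact ih (k + 1) (by omega) (by omega) (by omega)

theorem coprime_D_sub (x y d : Nat) (hd : 0 < d) :
    Nat.Coprime (2 ^ x * 5 ^ y) (10 ^ d - 1) := by
  have h10 : 1 ≤ 10 ^ d := Nat.one_le_pow _ _ (by norm_num)
  have key : ∀ p : Nat, p ∣ 10 → 2 ≤ p → ¬ p ∣ 10 ^ d - 1 := by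
    intro p hp10 hp2 hdvd
    have hpd : p ∣ 10 ^ d := dvd_pow hp10 (by omega)
    have : p ∣ 10 ^ d - (10 ^ d - 1) := Nat.dvd_sub hpd hdvd
    rw [Nat.sub_sub_self h10] at this
    have := Nat.le_of_dvd (by norm_num) this
    omega
  have c2 : Nat.Coprime 2 (10 ^ d - 1) :=
    (Nat.Prime.coprime_iff_not_dvd Nat.prime_two).mpr (key 2 (by norm_num) (by norm_num))
  have c5 : Nat.Coprime 5 (10 ^ d - 1) :=
    (Nat.Prime.coprime_iff_not_dvd (by norm_num)).mpr (key 5 (by norm_num) (by norm_num))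
  exact Nat.Coprime.mul_left (c2.pow_left x) (c5.pow_left y)

theorem coprime_m_10 (m : Nat) (h2 : ¬ 2 ∣ m) (h5 : ¬ 5 ∣ m) : Nat.Coprime m 10 := by
  have c2 : Nat.Coprime m 2 := ((Nat.Prime.coprime_iff_not_dvd Nat.prime_two).mpr h2).symm
  have c5 : Nat.Coprime m 5 := ((Nat.Prime.coprime_iff_not_dvd (by norm_num)).mpr h5).symm
  have : Nat.Coprime m (2 * 5) := Nat.Coprime.mul_right c2 c5
  simpa using this

theorem D_dvd_pow10 (x y i : Nat) : 2 ^ x * 5 ^ y ∣ 10 ^ i ↔ max x y ≤ i := by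
  have h10 : (10 : Nat) ^ i = 2 ^ i * 5 ^ i := by
    rw [show (10 : Nat) = 2 * 5 by norm_num, mul_pow]
  constructor
  · intro h
    rw [h10] at h
    have h2 : 2 ^ x ∣ 2 ^ i * 5 ^ i := dvd_trans (Dvd.intro _ rfl) h
    have h5 : 5 ^ y ∣ 2 ^ i * 5 ^ i := dvd_trans (Dvd.intro_left _ rfl) h
    have c25 : Nat.Coprime (2 ^ x) (5 ^ i) := Nat.Coprime.pow x i (by norm_num)
    have c52 : Nat.Coprime (5 ^ y) (2 ^ i) := Nat.Coprime.pow y i (by norm_num)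
    have hx : 2 ^ x ∣ 2 ^ i := c25.dvd_of_dvd_mul_right h2
    have hy : 5 ^ y ∣ 5 ^ i := c52.dvd_of_dvd_mul_left h5
    have hxi : x ≤ i := (Nat.pow_dvd_pow_iff_le_right (by norm_num)).mp hx
    have hyi : y ≤ i := (Nat.pow_dvd_pow_iff_le_right (by norm_num)).mp hy
    omega
  · intro h
    rw [h10]
    exact mul_dvd_mul (pow_dvd_pow 2 (by omega)) (pow_dvd_pow 5 (by omega))

theorem N_dvd_split (x y m i d : Nat) (hco : Nat.Coprime m 10) (hd : 0 < d) :
    2 ^ x * 5 ^ y * m ∣ 10 ^ i * (10 ^ d - 1) ↔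
      (2 ^ x * 5 ^ y ∣ 10 ^ i ∧ m ∣ 10 ^ d - 1) := by
  constructor
  · intro h
    have hD : 2 ^ x * 5 ^ y ∣ 10 ^ i * (10 ^ d - 1) := dvd_trans (Dvd.intro _ rfl) h
    have hm : m ∣ 10 ^ i * (10 ^ d - 1) := dvd_trans (Dvd.intro_left _ rfl) h
    exact ⟨(coprime_D_sub x y d hd).dvd_of_dvd_mul_right hD,
           (hco.pow_right i).dvd_of_dvd_mul_left hm⟩
  · intro ⟨h1, h2⟩
    exact mul_dvd_mul h1 h2

theorem N_dvd_pow (x y m i : Nat) (hco : Nat.Coprime m 10) :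
    2 ^ x * 5 ^ y * m ∣ 10 ^ i ↔ (max x y ≤ i ∧ m = 1) := by
  constructor
  · intro h
    have hD : 2 ^ x * 5 ^ y ∣ 10 ^ i := dvd_trans (Dvd.intro _ rfl) h
    have hmd : m ∣ 10 ^ i := dvd_trans (Dvd.intro_left _ rfl) h
    have hg1 : Nat.gcd m (10 ^ i) = 1 := hco.pow_right i
    have hg2 : Nat.gcd m (10 ^ i) = m := Nat.gcd_eq_left hmd
    exact ⟨(D_dvd_pow10 x y i).mp hD, by omega⟩
  · intro ⟨h1, h2⟩
    rw [h2, mul_one]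
    exact (D_dvd_pow10 x y i).mpr h1

theorem fseq_eq_iff (N i j : Nat) (hij : i < j) :
    fseq N i = fseq N j ↔ N ∣ 10 ^ i * (10 ^ (j - i) - 1) := by
  have hle : (10 : Nat) ^ i ≤ 10 ^ j := Nat.pow_le_pow_right (by norm_num) (by omega)
  have heq : 10 ^ j - 10 ^ i = 10 ^ i * (10 ^ (j - i) - 1) := by
    have : i + (j - i) = j := by omega
    rw [Nat.mul_sub, ← pow_add, this, mul_one]
  constructor
  · intro h
    have h' : (10 : Nat) ^ i ≡ 10 ^ j [MOD N] := h
    rw [← heq]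
    exact (Nat.modEq_iff_dvd' hle).mp h'
  · intro h
    rw [← heq] at h
    exact (Nat.modEq_iff_dvd' hle).mpr h

theorem fseq_zero_iff (N i : Nat) : fseq N i = 0 ↔ N ∣ 10 ^ i := by
  unfold fseq
  exact ⟨Nat.dvd_of_mod_eq_zero, Nat.mod_eq_zero_of_dvd⟩

theorem ord_dvd_iff (m d : Nat) (hm : 1 < m) : m ∣ 10 ^ d - 1 ↔ 10 ^ d % m = 1 := by
  have h1 : 1 ≤ 10 ^ d := Nat.one_le_pow _ _ (by norm_num)
  rw [← Nat.modEq_iff_dvd' h1]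
  unfold Nat.ModEq
  rw [Nat.mod_eq_of_lt hm]
  exact eq_comm

theorem t_bound (x y m : Nat) (hm : 0 < m) : max x y + m ≤ 2 ^ x * 5 ^ y * m := by
  have h2t : 2 ^ max x y ≤ 2 ^ x * 5 ^ y := by
    rcases Nat.le_total x y with h | h
    · rw [Nat.max_eq_right h]
      calc 2 ^ y ≤ 5 ^ y := Nat.pow_le_pow_left (by norm_num) y
        _ ≤ 2 ^ x * 5 ^ y := Nat.le_mul_of_pos_left _ (pow_pos (by norm_num) x)
    · rw [Nat.max_eq_left h]
      exact Nat.le_mul_of_pos_right _ (pow_pos (by norm_num) y)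
  have ht1 : max x y + 1 ≤ 2 ^ max x y := Nat.lt_two_pow_self
  have hs1 : max x y * 1 ≤ max x y * m := Nat.mul_le_mul_left _ hm
  have hs2 : (max x y + 1) * m ≤ 2 ^ max x y * m := Nat.mul_le_mul_right _ ht1
  have hs3 : 2 ^ max x y * m ≤ 2 ^ x * 5 ^ y * m := Nat.mul_le_mul_right _ h2t
  have hexp : (max x y + 1) * m = max x y * m + m := by ring
  omega

theorem fseq_step (n : Int) (hn : 2 ≤ n) (i : Nat) :
    PySem.Int.mod (((fseq n.toNat i : Nat) : Int) * 10) n = ((fseq n.toNat (i + 1) : Nat) : Int) := by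
  rw [PySem.Int.mod_eq_emod_of_pos (by omega)]
  have hNn : ((n.toNat : Nat) : Int) = n := Int.toNat_of_nonneg (by omega)
  rw [← hNn]
  have h : fseq n.toNat i * 10 % n.toNat = fseq n.toNat (i + 1) := by
    unfold fseq
    rw [Nat.mod_mul_mod, ← pow_succ]
  exact_mod_cast congrArg (fun z : Nat => (z : Int)) h

theorem loopA (n : Int) (hn : 2 ≤ n) (j' : Nat) (hj' : (j' : Int) < n)
    (hne : ∀ j, j < j' → ¬ Event n.toNat j) (res : Int)
    (hres : (∃ p, p < j' ∧ fseq n.toNat p = fseq n.toNat j' ∧ res = (j' : Int) - (p : Int) ∧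
               ∀ q, q < j' → fseq n.toNat q = fseq n.toNat j' → q = p) ∨
            ((∀ q, q < j' → fseq n.toNat q ≠ fseq n.toNat j') ∧ fseq n.toNat j' = 0 ∧ res = 0)) :
    ∀ k i, i + k = j' → ∀ pos : PySem.Dict Int Int,
      (∀ j, j < i → pos.get? ((fseq n.toNat j : Nat) : Int) = some ((j : Nat) : Int)) →
      (∀ x : Int, (∀ j, j < i → ((fseq n.toNat j : Nat) : Int) ≠ x) → pos.get? x = none) →
      recycleGo n pos ((fseq n.toNat i : Nat) : Int) (PySem.List.pyRange (i : Int) n 1) = res := by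
  intro k
  induction k with
  | zero =>
    intro i hi pos hsome hnone
    have hij : i = j' := by omega
    subst hij
    rw [PySem.List.pyRange_one_cons hj']
    simp only [recycleGo]
    rcases hres with ⟨p, hp, hfp, hresv, _⟩ | ⟨hnc, hz, hresv⟩
    · have hg : pos.get? ((fseq n.toNat i : Nat) : Int) = some ((p : Nat) : Int) := by
        rw [← hfp]; exact hsome p hp
      rw [PySem.Dict.contains_eq_isSome_get?, hg]
      simp [hresv]
    · have hg : pos.get? ((fseq n.toNat i : Nat) : Int) = none :=
        hnone _ (fun j hj heq => hnc j hj (Nat.cast_inj.mp heq))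
      rw [PySem.Dict.contains_eq_isSome_get?, hg, hz]
      simp [hresv]
  | succ k ih =>
    intro i hi pos hsome hnone
    have hilt : i < j' := by omega
    have hiltn : (i : Int) < n := lt_trans (by exact_mod_cast hilt) hj'
    rw [PySem.List.pyRange_one_cons hiltn]
    simp only [recycleGo]
    have hnoev := hne i hilt
    have hnc : ∀ j, j < i → fseq n.toNat j ≠ fseq n.toNat i :=
      fun j hj heq => hnoev (Or.inl ⟨j, hj, heq⟩)
    have hnz : fseq n.toNat i ≠ 0 := fun h => hnoev (Or.inr h)
    have hg : pos.get? ((fseq n.toNat i : Nat) : Int) = none :=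
      hnone _ (fun j hj heq => hnc j hj (Nat.cast_inj.mp heq))
    have hz' : ((fseq n.toNat i : Nat) : Int) ≠ 0 := by exact_mod_cast hnz
    rw [PySem.Dict.contains_eq_isSome_get?, hg]
    simp only [Option.isSome_none, Bool.false_eq_true, if_false, hz']
    rw [fseq_step n hn i]
    have hrange : (i : Int) + 1 = ((i + 1 : Nat) : Int) := by push_cast; ring
    rw [hrange]
    refine ih (i + 1) (by omega) (pos.insert ((fseq n.toNat i : Nat) : Int) (i : Int)) ?_ ?_
    · intro j hj
      rw [PySem.Dict.get?_insert]
      rcases Nat.lt_or_ge j i with hji | hji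
      · rw [if_neg (fun heq => hnc j hji (Nat.cast_inj.mp heq)), hsome j hji]
      · have : j = i := by omega
        subst this
        rw [if_pos rfl]
    · intro x hx
      rw [PySem.Dict.get?_insert]
      rw [if_neg (fun heq => hx i (by omega) heq.symm)]
      exact hnone x (fun j hj => hx j (by omega))

theorem recycle_eq (n : Int) : recycle n = recycle_alt n := by
  by_cases hn0 : n ≤ 0
  · unfold recycle recycle_alt
    rw [PySem.List.pyRange_one_eq_nil hn0]
    simp only [recycleGo]
    rw [if_pos hn0]
  · by_cases hn1 : n = 1
    · subst hn1
      have hs1 : stripP 2 1 = 1 := by rw [stripP]; norm_num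
      have hs5 : stripP 5 1 = 1 := by rw [stripP]; norm_num
      have hB : recycle_alt 1 = 0 := by
        simp [recycle_alt, hs1, hs5]
      have hr : PySem.List.pyRange 0 1 1 = [0] := by
        rw [PySem.List.pyRange_one_cons (by norm_num), PySem.List.pyRange_one_eq_nil (by norm_num)]
      rw [hB]
      unfold recycle
      rw [hr]
      simp [recycleGo, PySem.Dict.contains_empty]
    · have hn2 : 2 ≤ n := by omega
      have hNn : ((n.toNat : Nat) : Int) = n := Int.toNat_of_nonneg (by omega)
      have hN2 : 2 ≤ n.toNat := by omega
      obtain ⟨x, hxe, h2d, hpos1⟩ := stripP_spec 2 (by norm_num) n.toNat (by omega)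
      obtain ⟨y, hye, h5d, hposm⟩ := stripP_spec 5 (by norm_num) (stripP 2 n.toNat) hpos1
      have hmd : stripP 5 (stripP 2 n.toNat) ∣ stripP 2 n.toNat :=
        ⟨5 ^ y, hye.trans (mul_comm _ _)⟩
      have h2m : ¬ 2 ∣ stripP 5 (stripP 2 n.toNat) := fun h => h2d (dvd_trans h hmd)
      have hco : Nat.Coprime (stripP 5 (stripP 2 n.toNat)) 10 :=
        coprime_m_10 _ h2m h5d
      have hNeq : n.toNat = 2 ^ x * 5 ^ y * stripP 5 (stripP 2 n.toNat) := by
        have h1 : 2 ^ x * 5 ^ y * stripP 5 (stripP 2 n.toNat) =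
            2 ^ x * (5 ^ y * stripP 5 (stripP 2 n.toNat)) := by ring
        rw [h1, ← hye, ← hxe]
      -- abbreviations
      set m := stripP 5 (stripP 2 n.toNat) with hmdef
      set t := max x y with htdef
      have hbound : t + m ≤ n.toNat := hNeq ▸ t_bound x y m hposm
      -- collision / zero characterizations
      have hcoll : ∀ i j : Nat, i < j →
          (fseq n.toNat i = fseq n.toNat j ↔ (t ≤ i ∧ m ∣ 10 ^ (j - i) - 1)) := by
        intro i j hij
        rw [fseq_eq_iff n.toNat i j hij, hNeq,
            N_dvd_split x y m i (j - i) hco (by omega), D_dvd_pow10]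
      have hzero : ∀ i : Nat, (fseq n.toNat i = 0 ↔ (t ≤ i ∧ m = 1)) := by
        intro i
        rw [fseq_zero_iff, hNeq, N_dvd_pow x y m i hco]
      by_cases hm1 : m = 1
      · -- n = 2^x * 5^y: A hits remainder 0 at index t, B returns 0 from the m = 1 test
        have hj' : (t : Int) < n := by
          have : t < n.toNat := by omega
          calc (t : Int) < ((n.toNat : Nat) : Int) := by exact_mod_cast this
            _ = n := hNn
        have hne : ∀ j, j < t → ¬ Event n.toNat j := by
          intro j hj hev
          rcases hev with ⟨i, hij, hf⟩ | hz
          · have := (hcoll i j hij).mp hf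
            omega
          · have := (hzero j).mp hz
            omega
        have hres : (∀ q, q < t → fseq n.toNat q ≠ fseq n.toNat t) ∧ fseq n.toNat t = 0 ∧ (0 : Int) = 0 := by
          refine ⟨?_, (hzero t).mpr ⟨le_refl t, hm1⟩, rfl⟩
          intro q hq hf
          have := (hcoll q t hq).mp hf
          omega
        have h0 := loopA n hn2 t hj' hne 0 (Or.inr hres) t 0 (by omega) PySem.Dict.empty
          (fun j hj => absurd hj (Nat.not_lt_zero j))
          (fun x _ => PySem.Dict.get?_empty x)
        have hf0 : ((fseq n.toNat 0 : Nat) : Int) = 1 := by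
          unfold fseq
          rw [pow_zero, Nat.mod_eq_of_lt (by omega)]
          norm_num
        have hB : recycle_alt n = 0 := by
          simp [recycle_alt, ← hmdef, hm1, show ¬ n ≤ 0 by omega]
        rw [hB]
        unfold recycle
        simpa only [hf0, Nat.cast_zero] using h0
      · -- general case: A returns the first repeat distance, B the order of 10 mod m; both = ord
        have hm2 : 1 < m := by omega
        have hex : ∃ kk, 0 < kk ∧ 10 ^ kk % m = 1 := by
          refine ⟨Nat.totient m, Nat.totient_pos.mpr (by omega), ?_⟩
          have h := Nat.ModEq.pow_totient hco.symm
          unfold Nat.ModEq at h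
          rw [Nat.mod_eq_of_lt hm2] at h
          exact h
        set ord := Nat.find hex with horddef
        obtain ⟨hordpos, hordeq⟩ := Nat.find_spec hex
        have hmin : ∀ j, 0 < j → 10 ^ j % m = 1 → ord ≤ j :=
          fun j hj he => Nat.find_min' hex ⟨hj, he⟩
        have hordm : ord < m := by
          have h1 : ord ≤ Nat.totient m := Nat.find_min' hex
            ⟨Nat.totient_pos.mpr (by omega), by
              have h := Nat.ModEq.pow_totient hco.symm
              unfold Nat.ModEq at h
              rw [Nat.mod_eq_of_lt hm2] at h
              exact h⟩
          have h2 : Nat.totient m < m := Nat.totient_lt m hm2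
          omega
        have hj'N : t + ord < n.toNat := by omega
        have hj' : ((t + ord : Nat) : Int) < n := by
          calc ((t + ord : Nat) : Int) < ((n.toNat : Nat) : Int) := by exact_mod_cast hj'N
            _ = n := hNn
        have hne : ∀ j, j < t + ord → ¬ Event n.toNat j := by
          intro j hj hev
          rcases hev with ⟨i, hij, hf⟩ | hz
          · obtain ⟨hti, hdvd⟩ := (hcoll i j hij).mp hf
            have := hmin (j - i) (by omega) ((ord_dvd_iff m (j - i) hm2).mp hdvd)
            omega
          · have := (hzero j).mp hz
            omega
        have hfteq : fseq n.toNat t = fseq n.toNat (t + ord) := by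
          refine (hcoll t (t + ord) (by omega)).mpr ⟨le_refl t, ?_⟩
          rw [show t + ord - t = ord by omega]
          exact (ord_dvd_iff m ord hm2).mpr hordeq
        have huniq : ∀ q, q < t + ord → fseq n.toNat q = fseq n.toNat (t + ord) → q = t := by
          intro q hq hf
          obtain ⟨htq, hdvd⟩ := (hcoll q (t + ord) hq).mp hf
          have := hmin (t + ord - q) (by omega) ((ord_dvd_iff m (t + ord - q) hm2).mp hdvd)
          omega
        have hresv : ((ord : Nat) : Int) = ((t + ord : Nat) : Int) - ((t : Nat) : Int) := by
          push_cast; ring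
        have h0 := loopA n hn2 (t + ord) hj' hne ((ord : Nat) : Int)
          (Or.inl ⟨t, by omega, hfteq, hresv, huniq⟩) (t + ord) 0 (by omega) PySem.Dict.empty
          (fun j hj => absurd hj (Nat.not_lt_zero j))
          (fun x _ => PySem.Dict.get?_empty x)
        have hf0 : ((fseq n.toNat 0 : Nat) : Int) = 1 := by
          unfold fseq
          rw [pow_zero, Nat.mod_eq_of_lt (by omega)]
          norm_num
        have hB : recycle_alt n = ((ord : Nat) : Int) := by
          have hloop : ordLoop m m (10 % m) 1 = ord := by
            have h10 : 10 % m = 10 ^ 1 % m := by rw [pow_one]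
            rw [h10]
            exact ordLoop_correct m ord hordeq hmin m 1 (by omega) (by omega) (by omega)
          simp [recycle_alt, ← hmdef, hm1, show ¬ n ≤ 0 by omega, hloop]
        rw [hB]
        unfold recycle
        simpa only [hf0, Nat.cast_zero] using h0

-- ===== VERDICT (by name: the statement is the Claim_ definition above) =====
theorem recycle_spec : Claim_equal_recycle := by
  intro n _
  unfold Spec_recycle
  exact recycle_eq n
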